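-- pv_equiv track=rewrite | github.com/raeez/chiral-bar-cobar | compute/lib/spectral_sequence.py | associahedron_f_vector
-- ===== SOURCE A (Python) =====
-- from typing import Dict, List, Tuple
--
-- def _narayana(n: int, k: int) -> int:
--     """Narayana number N(n, k) = (1/n) C(n, k) C(n, k-1)."""
--     from math import comb
--     if n <= 0 or k <= 0 or k > n:
--         return 0
--     return comb(n, k) * comb(n, k - 1) // n
--
-- def associahedron_f_vector(n: int) -> List[int]:
--     """f-vector of the associahedron K_n (number of faces by dimension).
--
--     K_n is simple of dimension n-2. Its h-vector is given by Narayana numbers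
--     h_k = N(n-1, k+1), and f_k = sum_{j=0}^{d-k} C(d-j, d-k-j) * h_j.
--
--     K_2 = point: f = [1]
--     K_3 = interval: f = [2, 1]
--     K_4 = pentagon: f = [5, 5, 1]
--     K_5 = 3d associahedron: f = [14, 21, 9, 1]
--
--     Raises ValueError for n < 2.
--     """
--     from math import comb
--     if n < 2:
--         raise ValueError(f"Associahedron K_n requires n >= 2, got {n}")
--     d = n - 2  # dimension
--     h = [_narayana(n - 1, j + 1) for j in range(d + 1)]
--     return [
--         sum(comb(d - j, d - k - j) * h[j] for j in range(d - k + 1))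
--         for k in range(d + 1)
--     ]
-- ===== SOURCE B (Python) =====
-- from typing import List
--
-- def associahedron_f_vector(n: int) -> List[int]:
--     """f-vector of K_n by Horner evaluation of the Narayana h-polynomial at 1+t:
--     f(t) = sum_j h_j (1+t)^(d-j), built incrementally, no inner binomial sums."""
--     from math import comb
--     if n < 2:
--         raise ValueError(f"Associahedron K_n requires n >= 2, got {n}")
--     d = n - 2
--
--     def h(j: int) -> int:
--         return comb(n - 1, j + 1) * comb(n - 1, j) // (n - 1)
--
--     acc = [h(0)]
--     for j in range(1, d + 1):
--         acc = ([acc[0] + h(j)]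
--                + [acc[i - 1] + acc[i] for i in range(1, len(acc))]
--                + [acc[-1]])
--     return acc
-- ===== Notes on version B (the rewrite author's own statement) =====
-- stated objective: alternative
-- what changed: A computes each face number f_k as an explicit weighted sum over the Narayana h-vector (a double loop of binomial coefficients); B instead evaluates the h-polynomial at 1+t by Horner's rule, building the whole f-vector incrementally with additions only, so the inner binomial sum and the comb calls in the transform disappear.
import Mathlib
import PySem

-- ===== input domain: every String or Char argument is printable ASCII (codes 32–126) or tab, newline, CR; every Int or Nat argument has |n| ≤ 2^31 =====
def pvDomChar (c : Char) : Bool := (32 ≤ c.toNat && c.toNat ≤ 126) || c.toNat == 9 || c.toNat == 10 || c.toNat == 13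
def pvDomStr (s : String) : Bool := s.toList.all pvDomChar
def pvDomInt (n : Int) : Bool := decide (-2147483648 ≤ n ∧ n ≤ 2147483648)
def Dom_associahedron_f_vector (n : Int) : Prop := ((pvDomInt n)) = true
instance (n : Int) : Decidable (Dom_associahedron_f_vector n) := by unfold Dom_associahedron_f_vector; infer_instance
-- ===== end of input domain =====

-- B replaces A's h-vector-weighted double binomial sum by Horner evaluation of the
-- h-polynomial at 1+t (an alternative algorithm, additions only in the transform);
-- on inputs excluded by Pre_ both Pythons raise the identical ValueError.

-- ===== PORT A =====
-- math.comb for the nonnegative arguments occurring here (exact: comb(a,b)=C(a,b), 0 if b>a)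
def pvComb (a b : Int) : Int := (Nat.choose a.toNat b.toNat : Int)

def pvNarayana (n k : Int) : Int :=
  if n ≤ 0 ∨ k ≤ 0 ∨ k > n then 0
  else PySem.Int.floordiv (pvComb n k * pvComb n (k - 1)) n

def associahedron_f_vector (n : Int) : List Int :=
  if n < 2 then []  -- Python raises ValueError here; outside Pre_
  else
    let d := n - 2
    let h := (PySem.List.pyRange 0 (d + 1) 1).map (fun j => pvNarayana (n - 1) (j + 1))
    (PySem.List.pyRange 0 (d + 1) 1).map (fun k =>
      ((PySem.List.pyRange 0 (d - k + 1) 1).map (fun j =>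
        pvComb (d - j) (d - k - j) * PySem.List.pyGetD h j 0)).sum)

-- ===== PORT B =====
def pvH (n j : Int) : Int :=
  PySem.Int.floordiv (pvComb (n - 1) (j + 1) * pvComb (n - 1) j) (n - 1)

def pvStep (n : Int) (acc : List Int) (j : Int) : List Int :=
  (PySem.List.pyGetD acc 0 0 + pvH n j)
    :: ((PySem.List.pyRange 1 (acc.length : Int) 1).map (fun i =>
          PySem.List.pyGetD acc (i - 1) 0 + PySem.List.pyGetD acc i 0))
    ++ [PySem.List.pyGetD acc (-1) 0]

def associahedron_f_vector_alt (n : Int) : List Int :=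
  if n < 2 then []  -- Python raises ValueError here; outside Pre_
  else
    let d := n - 2
    (PySem.List.pyRange 1 (d + 1) 1).foldl (pvStep n) [pvH n 0]

-- ===== PRECONDITION & SPEC =====
-- Pre_ excludes exactly n < 2, where the Python A raises ValueError.
def Pre_associahedron_f_vector (n : Int) : Prop := 2 ≤ n
instance (n : Int) : Decidable (Pre_associahedron_f_vector n) := by
  unfold Pre_associahedron_f_vector; infer_instance
def pvWitness_associahedron_f_vector : Int := 4

def Spec_associahedron_f_vector (n : Int) (out : List Int) : Prop := out = associahedron_f_vector_alt n
instance (n : Int) (out : List Int) : Decidable (Spec_associahedron_f_vector n out) := by unfold Spec_associahedron_f_vector; infer_instance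

-- ===== CLAIM (what is proved, stated in full; the proofs are below) =====
def Claim_equal_associahedron_f_vector : Prop := ∀ (n : Int), Dom_associahedron_f_vector n → Pre_associahedron_f_vector n → Spec_associahedron_f_vector n (associahedron_f_vector n)

-- ===== LEMMAS AND PROOFS =====

-- Nat-level value of the k-th entry of A's result (g abstracts the shared h-vector values)
def pvS (g : Nat → Int) (D i : Nat) : Int :=
  ((List.range (D + 1)).map (fun j => (Nat.choose (D - j) i : Int) * g j)).sum

theorem pvS_zero (g : Nat → Int) (D : Nat) :
    pvS g (D + 1) 0 = pvS g D 0 + g (D + 1) := by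
  simp [pvS, List.range_succ]
  ring

theorem pvS_top (g : Nat → Int) (D : Nat) : pvS g D (D + 1) = 0 := by
  unfold pvS
  apply List.sum_eq_zero
  intro x hx
  simp only [List.mem_map, List.mem_range] at hx
  obtain ⟨j, hj, rfl⟩ := hx
  rw [Nat.choose_eq_zero_of_lt (by omega)]
  simp

theorem pvS_pascal (g : Nat → Int) (D k : Nat) :
    pvS g D k + pvS g D (k + 1) = pvS g (D + 1) (k + 1) := by
  unfold pvS
  rw [List.range_succ (n := D + 1), List.map_append, List.sum_append]
  have h1 : ∀ j, j ∈ List.range (D + 1) →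
      ((Nat.choose (D + 1 - j) (k + 1) : Int) * g j)
        = (Nat.choose (D - j) k : Int) * g j + (Nat.choose (D - j) (k + 1) : Int) * g j := by
    intro j hj
    rw [List.mem_range] at hj
    have : D + 1 - j = (D - j) + 1 := by omega
    rw [this, Nat.choose_succ_succ]
    push_cast
    ring
  rw [List.map_congr_left h1]
  have h2 : ((List.range (D + 1)).map (fun j => (Nat.choose (D - j) k : Int) * g j
      + (Nat.choose (D - j) (k + 1) : Int) * g j)).sum
      = ((List.range (D + 1)).map (fun j => (Nat.choose (D - j) k : Int) * g j)).sum
      + ((List.range (D + 1)).map (fun j => (Nat.choose (D - j) (k + 1) : Int) * g j)).sum := by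
    induction (List.range (D + 1)) with
    | nil => simp
    | cons x xs ih => simp [ih]; ring
  rw [h2]
  simp [Nat.choose_eq_zero_of_lt (Nat.succ_pos k)]

-- the list produced after the step at j = D+1, from the list for D
theorem pvStep_tgt (n : Int) (D : Nat) :
    pvStep n ((List.range (D + 1)).map (pvS (fun j => pvH n (j : Int)) D)) ((D : Int) + 1)
      = (List.range (D + 1 + 1)).map (pvS (fun j => pvH n (j : Int)) (D + 1)) := by
  set g : Nat → Int := fun j => pvH n (j : Int) with hg
  set F : Nat → Int := pvS g D with hF
  have hlen : ((List.range (D + 1)).map F).length = D + 1 := by simp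
  have hget : ∀ k : Nat, k < D + 1 →
      PySem.List.pyGetD ((List.range (D + 1)).map F) (k : Int) 0 = F k := by
    intro k hk
    rw [PySem.List.pyGetD_natCast]
    simp [List.getD_eq_getElem?_getD, List.getElem?_map, List.getElem?_range hk]
  unfold pvStep
  rw [hlen]
  have h0 := hget 0 (by omega)
  rw [Nat.cast_zero] at h0
  have hlast : PySem.List.pyGetD ((List.range (D + 1)).map F) (-1) 0 = F D := by
    rw [List.range_succ, List.map_append, List.map_cons, List.map_nil]
    exact PySem.List.pyGetD_neg_one_append_singleton _ _ _
  have hmid : (PySem.List.pyRange 1 ((D + 1 : Nat) : Int) 1).map (fun i =>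
        PySem.List.pyGetD ((List.range (D + 1)).map F) (i - 1) 0
          + PySem.List.pyGetD ((List.range (D + 1)).map F) i 0)
      = (List.range D).map (fun k => F k + F (k + 1)) := by
    rw [PySem.List.pyRange_one]
    have : (((D + 1 : Nat) : Int) - 1).toNat = D := by omega
    rw [this, List.map_map]
    apply List.map_congr_left
    intro k hk
    rw [List.mem_range] at hk
    have e2 : (1 : Int) + (k : Int) = ((k + 1 : Nat) : Int) := by push_cast; ring
    have e1 : ((k + 1 : Nat) : Int) - 1 = (k : Int) := by push_cast; ring
    simp only [Function.comp_apply, e2, e1]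
    rw [hget k (by omega), hget (k + 1) (by omega)]
  rw [h0, hlast, hmid]
  have hhead : F 0 + pvH n ((D : Int) + 1) = pvS g (D + 1) 0 := by
    rw [pvS_zero]
    have : ((D : Int) + 1) = ((D + 1 : Nat) : Int) := by push_cast; ring
    rw [this]
  have htail : (List.range D).map (fun k => F k + F (k + 1)) ++ [F D]
      = (List.range (D + 1)).map (pvS g (D + 1) ∘ Nat.succ) := by
    rw [List.range_succ, List.map_append, List.map_cons, List.map_nil]
    congr 1
    · apply List.map_congr_left
      intro k hk
      simp only [Function.comp_apply, Nat.succ_eq_add_one]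
      exact pvS_pascal g D k
    · simp only [Function.comp_apply, Nat.succ_eq_add_one]
      rw [← pvS_pascal g D D, pvS_top, add_zero]
  rw [List.range_succ_eq_map (n := D + 1), List.map_cons, List.map_map, ← hhead, ← htail]
  exact List.cons_append

theorem B_fold (n : Int) (D : Nat) :
    (PySem.List.pyRange 1 ((D : Int) + 1) 1).foldl (pvStep n) [pvH n 0]
      = (List.range (D + 1)).map (pvS (fun j => pvH n (j : Int)) D) := by
  induction D with
  | zero => simp [PySem.List.pyRange_one_eq_nil (by omega : (1:Int) ≤ 1), pvS]
  | succ D ih =>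
    have hcast : ((D + 1 : Nat) : Int) + 1 = ((D : Int) + 1) + 1 := by push_cast; ring
    rw [hcast, PySem.List.pyRange_one_succ_right (by omega : (1:Int) ≤ (D:Int)+1)]
    rw [List.foldl_append, ih]
    simp only [List.foldl_cons, List.foldl_nil]
    exact pvStep_tgt n D

theorem narayana_eq_h (n : Int) (hn : 2 ≤ n) (j : Nat) (hj : (j : Int) ≤ n - 2) :
    pvNarayana (n - 1) ((j : Int) + 1) = pvH n (j : Int) := by
  unfold pvNarayana pvH
  rw [if_neg (by omega : ¬(n - 1 ≤ 0 ∨ (j : Int) + 1 ≤ 0 ∨ (j : Int) + 1 > n - 1))]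
  have : (j : Int) + 1 - 1 = (j : Int) := by ring
  rw [this]

-- the inner sum of A at index k equals pvS, for any list hs agreeing with the h-values
theorem inner_eq (n : Int) (D k : Nat) (hk : k < D + 1) (hs : List Int)
    (hhs : ∀ j : Nat, j < D + 1 → PySem.List.pyGetD hs (j : Int) 0 = pvH n (j : Int)) :
    ((PySem.List.pyRange 0 ((D : Int) - (k : Int) + 1) 1).map (fun j =>
        pvComb ((D : Int) - j) ((D : Int) - (k : Int) - j) * PySem.List.pyGetD hs j 0)).sum
      = pvS (fun j => pvH n (j : Int)) D k := by
  have hrange : (D : Int) - (k : Int) + 1 = ((D - k + 1 : Nat) : Int) := by omega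
  rw [hrange, PySem.List.pyRange_zero_natCast, List.map_map]
  have hterm : ∀ j, j ∈ List.range (D - k + 1) →
      ((fun j => pvComb ((D : Int) - j) ((D : Int) - (k : Int) - j)
          * PySem.List.pyGetD hs j 0) ∘ (fun (j : Nat) => (j : Int))) j
        = (Nat.choose (D - j) k : Int) * pvH n (j : Int) := by
    intro j hj
    rw [List.mem_range] at hj
    simp only [Function.comp_apply]
    have hc : pvComb ((D : Int) - (j : Int)) ((D : Int) - (k : Int) - (j : Int))
        = (Nat.choose (D - j) k : Int) := by
      unfold pvComb
      have e1 : ((D : Int) - (j : Int)).toNat = D - j := by omega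
      have e2 : ((D : Int) - (k : Int) - (j : Int)).toNat = D - k - j := by omega
      rw [e1, e2]
      have e3 : D - k - j = (D - j) - k := by omega
      rw [e3, Nat.choose_symm (by omega : k ≤ D - j)]
    rw [hc, hhs j (by omega)]
  rw [List.map_congr_left hterm]
  unfold pvS
  beta_reduce
  have hsplit : D + 1 = (D - k + 1) + k := by omega
  have hra : List.range (D + 1)
      = List.range (D - k + 1) ++ (List.range k).map (fun x => D - k + 1 + x) := by
    rw [hsplit, List.range_add]
  rw [hra, List.map_append, List.sum_append, List.map_map]
  have hzero : ((List.range k).map ((fun j => (Nat.choose (D - j) k : Int) * pvH n (j : Int))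
      ∘ (fun x => D - k + 1 + x))).sum = 0 := by
    apply List.sum_eq_zero
    intro x hx
    simp only [List.mem_map, List.mem_range] at hx
    obtain ⟨t, ht, rfl⟩ := hx
    simp only [Function.comp_apply]
    rw [Nat.choose_eq_zero_of_lt (by omega)]
    simp
  rw [hzero, add_zero]

theorem A_eq_map (n : Int) (D : Nat) (hn : n = (D : Int) + 2) :
    associahedron_f_vector n = (List.range (D + 1)).map (pvS (fun j => pvH n (j : Int)) D) := by
  unfold associahedron_f_vector
  rw [if_neg (by omega)]
  have hd : n - 2 = (D : Int) := by omega
  simp only [hd]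
  have hD1 : (D : Int) + 1 = ((D + 1 : Nat) : Int) := by push_cast; ring
  rw [hD1, PySem.List.pyRange_zero_natCast, List.map_map]
  apply List.map_congr_left
  intro k hk
  rw [List.mem_range] at hk
  simp only [Function.comp_apply]
  refine inner_eq n D k hk _ ?_
  intro j hj
  rw [PySem.List.pyGetD_natCast]
  simp only [List.getD_eq_getElem?_getD, List.getElem?_map, List.getElem?_range hj,
    Option.map_some, Option.getD_some]
  exact narayana_eq_h n (by omega) j (by omega)

-- ===== VERDICT (by name: the statement is the Claim_ definition above) =====
theorem associahedron_f_vector_spec : Claim_equal_associahedron_f_vector := by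
  intro n _ hpre
  unfold Spec_associahedron_f_vector
  have hpre' : 2 <= n := hpre
  set D : Nat := (n - 2).toNat with hD
  have hn : n = (D : Int) + 2 := by omega
  rw [A_eq_map n D hn]
  unfold associahedron_f_vector_alt
  rw [if_neg (by omega)]
  have hd : n - 2 = (D : Int) := by omega
  simp only [hd]
  exact (B_fold n D).symm
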